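-- pv_equiv track=rewrite | github.com/maxwell-hauser/py_07_signed_magnitude | py_07_signed_magnitude_gh.py | decimal_to_signed_representations
-- ===== SOURCE A (Python) =====
-- def decimal_to_signed_representations(decimal, bits=4):
--     """Convert decimal to different signed representations"""
--     if decimal >= 0:
--         # Positive: same for all
--         binary = format(decimal, f'0{bits}b')
--         return {
--             'signed_magnitude': binary,
--             'twos_complement': binary
--         }
--     else:
--         # Negative
--         magnitude = abs(decimal)
--         mag_binary = format(magnitude, f'0{bits}b')
--
--         # Signed magnitude: just flip MSB
--         signed_mag = '1' + mag_binary[1:]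
--
--         # Two's complement: flip all bits and add 1
--         flipped = ''.join('0' if bit == '1' else '1' for bit in mag_binary)
--         # Add 1
--         carry = 1
--         result = list(flipped)
--         for i in range(len(result) - 1, -1, -1):
--             if carry == 0:
--                 break
--             if result[i] == '0':
--                 result[i] = '1'
--                 carry = 0
--             else:
--                 result[i] = '0'
--         twos = ''.join(result)
--
--         return {
--             'signed_magnitude': signed_mag,
--             'twos_complement': twos
--         }
-- ===== SOURCE B (Python) =====
-- def decimal_to_signed_representations(decimal, bits=4):
--     """Convert decimal to different signed representations"""
--     if decimal >= 0:
--         binary = format(decimal, f'0{bits}b')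
--         return {'signed_magnitude': binary, 'twos_complement': binary}
--     mag_binary = format(-decimal, f'0{bits}b')
--     L = len(mag_binary)
--     return {
--         'signed_magnitude': '1' + mag_binary[1:],
--         'twos_complement': format(decimal & ((1 << L) - 1), f'0{L}b'),
--     }
-- ===== Notes on version B (the rewrite author's own statement) =====
-- stated objective: simpler
-- what changed: The negative branch's bit-flip pass plus ripple-carry add-one loop is replaced by the closed-form masked value decimal & ((1 << L) - 1) formatted at width L = len(mag_binary), i.e. the two's complement is computed as one modular arithmetic expression instead of iterative bit manipulation.
import Mathlib
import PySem

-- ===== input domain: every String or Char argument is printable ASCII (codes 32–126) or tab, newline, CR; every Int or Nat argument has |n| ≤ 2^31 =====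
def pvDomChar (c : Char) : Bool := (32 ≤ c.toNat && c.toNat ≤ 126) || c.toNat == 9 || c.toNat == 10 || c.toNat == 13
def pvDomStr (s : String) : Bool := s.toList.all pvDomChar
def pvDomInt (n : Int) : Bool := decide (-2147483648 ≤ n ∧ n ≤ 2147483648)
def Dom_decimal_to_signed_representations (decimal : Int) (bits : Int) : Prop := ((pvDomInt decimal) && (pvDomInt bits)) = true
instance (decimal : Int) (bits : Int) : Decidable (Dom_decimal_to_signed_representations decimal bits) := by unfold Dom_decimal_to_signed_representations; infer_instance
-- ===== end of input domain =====

-- B replaces A's bit-flip pass and ripple-carry '+1' loop by the closed-form masked value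
-- `decimal & ((1 << L) - 1)` formatted at width L (objective: simpler/alternative).

-- ===== PORT A =====
-- shared exact port of the builtin format(v, f'0{w}b') for v, w ≥ 0:
-- pvRbits L v = the low L binary digits of v, least significant first
def pvRbits : Nat → Nat → List Char
  | 0, _ => []
  | L + 1, v => (if v % 2 = 1 then '1' else '0') :: pvRbits L (v / 2)

-- Python's digit count of v is max 1 v.size; format pads with '0' to width w
def pvFormatBin (v w : Nat) : String := String.ofList ((pvRbits (max w (max 1 v.size)) v).reverse)

-- A-side: the genexp "'0' if bit == '1' else '1'"
def pvFlip (c : Char) : Char := if c = '1' then '0' else '1'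

-- A-side: the carry loop over `result` from the last index down, with break at carry = 0,
-- transcribed on the reversed digit list
def pvAddOneRev : List Char → List Char
  | [] => []
  | c :: rest => if c = '0' then '1' :: rest else '0' :: pvAddOneRev rest

def decimal_to_signed_representations (decimal : Int) (bits : Int) : List (String × String) :=
  if decimal ≥ 0 then
    let binary := pvFormatBin decimal.toNat bits.toNat
    [("signed_magnitude", binary), ("twos_complement", binary)]
  else
    let magnitude := decimal.natAbs
    let magBinary := (pvFormatBin magnitude bits.toNat).toList
    let signedMag := String.ofList ('1' :: magBinary.drop 1)
    let flipped := magBinary.map pvFlip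
    let result := (pvAddOneRev flipped.reverse).reverse
    [("signed_magnitude", signedMag), ("twos_complement", String.ofList result)]

-- ===== PORT B =====
def decimal_to_signed_representations_alt (decimal : Int) (bits : Int) : List (String × String) :=
  if decimal ≥ 0 then
    let binary := pvFormatBin decimal.toNat bits.toNat
    [("signed_magnitude", binary), ("twos_complement", binary)]
  else
    let magBinary := (pvFormatBin (-decimal).toNat bits.toNat).toList
    let L := magBinary.length
    -- `decimal & ((1 << L) - 1)`: Python's & with the all-ones mask is exactly mod 2^L
    let t := (PySem.Int.mod decimal ((2 : Int) ^ L)).toNat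
    [("signed_magnitude", String.ofList ('1' :: magBinary.drop 1)),
     ("twos_complement", pvFormatBin t L)]

-- ===== PRECONDITION & SPEC =====
-- Pre_ excludes bits < 0, on which A's format spec f'0{bits}b' raises ValueError.
def Pre_decimal_to_signed_representations (decimal : Int) (bits : Int) : Prop := 0 ≤ bits
instance (decimal : Int) (bits : Int) : Decidable (Pre_decimal_to_signed_representations decimal bits) := by unfold Pre_decimal_to_signed_representations; infer_instance
def pvWitness_decimal_to_signed_representations : Int × Int := (-5, 4)
def Spec_decimal_to_signed_representations (decimal : Int) (bits : Int) (out : List (String × String)) : Prop := out = decimal_to_signed_representations_alt decimal bits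
instance (decimal : Int) (bits : Int) (out : List (String × String)) : Decidable (Spec_decimal_to_signed_representations decimal bits out) := by unfold Spec_decimal_to_signed_representations; infer_instance

-- ===== CLAIM (what is proved, stated in full; the proofs are below) =====
def Claim_equal_decimal_to_signed_representations : Prop := ∀ (decimal : Int) (bits : Int), Dom_decimal_to_signed_representations decimal bits → Pre_decimal_to_signed_representations decimal bits → Spec_decimal_to_signed_representations decimal bits (decimal_to_signed_representations decimal bits)

-- ===== LEMMAS AND PROOFS =====

theorem pvRbits_length (L v : Nat) : (pvRbits L v).length = L := by
  induction L generalizing v with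
  | zero => rfl
  | succ L ih => simp [pvRbits, ih]

theorem pvRbits_map_flip (L v : Nat) (h : v < 2 ^ L) :
    (pvRbits L v).map pvFlip = pvRbits L (2 ^ L - 1 - v) := by
  induction L generalizing v with
  | zero => rfl
  | succ L ih =>
    have hp : 0 < 2 ^ L := Nat.pow_pos (by norm_num)
    have h2 : 2 ^ (L + 1) = 2 * 2 ^ L := by ring
    have hv2 : v / 2 < 2 ^ L := by omega
    have hdiv : (2 ^ (L + 1) - 1 - v) / 2 = 2 ^ L - 1 - v / 2 := by omega
    have hmod : (2 ^ (L + 1) - 1 - v) % 2 = 1 - v % 2 := by omega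
    by_cases hb : v % 2 = 1
    · simp [pvRbits, hb, pvFlip, ih _ hv2, hdiv, hmod]
    · have : (2 ^ (L + 1) - 1 - v) % 2 = 1 := by omega
      simp [pvRbits, hb, pvFlip, ih _ hv2, hdiv, this]

theorem pvAddOneRev_rbits (L v : Nat) :
    pvAddOneRev (pvRbits L v) = pvRbits L (v + 1) := by
  induction L generalizing v with
  | zero => rfl
  | succ L ih =>
    by_cases hb : v % 2 = 1
    · have h1 : (v + 1) % 2 = 0 := by omega
      have h2 : (v + 1) / 2 = v / 2 + 1 := by omega
      simp [pvRbits, hb, pvAddOneRev, h1, h2, ih]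
    · have h1 : (v + 1) % 2 = 1 := by omega
      have h2 : (v + 1) / 2 = v / 2 := by omega
      simp [pvRbits, hb, pvAddOneRev, h1, h2]

-- ===== VERDICT (by name: the statement is the Claim_ definition above) =====
theorem decimal_to_signed_representations_spec : Claim_equal_decimal_to_signed_representations := by
  intro decimal bits _hdom hpre
  unfold Spec_decimal_to_signed_representations
  unfold decimal_to_signed_representations decimal_to_signed_representations_alt
  by_cases hpos : decimal ≥ 0
  · simp [hpos]
  · simp only [hpos, if_false]
    have hneg : decimal < 0 := by omega
    have hnat : (-decimal).toNat = decimal.natAbs := by omega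
    set m : Nat := decimal.natAbs with hm
    have hm1 : 1 ≤ m := by omega
    set w : Nat := bits.toNat with hw
    set L : Nat := max w (max 1 m.size) with hL
    have hsize : m.size ≤ L := by omega
    have hmL : m < 2 ^ L := lt_of_lt_of_le (Nat.lt_size_self m) (Nat.pow_le_pow_right (by norm_num) hsize)
    have hL1 : 1 ≤ L := by omega
    have hpL : 0 < (2 : Nat) ^ L := Nat.pow_pos (by norm_num)
    -- the shared magnitude string, as a reversed digit list
    have hmag : (pvFormatBin m w).toList = (pvRbits L m).reverse := by
      simp only [pvFormatBin, String.toList_ofList, hL]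
    have hrevlen : ((pvRbits L m).reverse).length = L := by
      simp [pvRbits_length]
    -- A's flipped+carry result equals the digits of 2^L - m
    have hA : (pvAddOneRev (((pvRbits L m).reverse.map pvFlip).reverse)).reverse
        = (pvRbits L (2 ^ L - m)).reverse := by
      rw [← List.map_reverse, List.reverse_reverse,
        pvRbits_map_flip L m hmL, pvAddOneRev_rbits]
      congr 2
      omega
    -- B's masked value is 2^L - m
    have hmodB : PySem.Int.mod decimal ((2 : Int) ^ L) = ((2 ^ L - m : Nat) : Int) := by
      rw [PySem.Int.mod_eq_emod_of_pos (by positivity : (0 : Int) < 2 ^ L)]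
      have hd : decimal = -(m : Int) := by omega
      have hcast : ((2 : Int) ^ L) = (((2 ^ L : Nat) : Int)) := by push_cast; ring
      rw [hd, hcast,
        show (-(m : Int)) = (((2 ^ L - m : Nat) : Int)) + ((2 ^ L : Nat) : Int) * (-1) by
          push_cast [Nat.cast_sub hmL.le]; ring,
        Int.add_mul_emod_self_left]
      exact Int.emod_eq_of_lt (Int.natCast_nonneg _)
        (by exact_mod_cast (by omega : 2 ^ L - m < 2 ^ L))
    have htL : (2 : Nat) ^ L - m < 2 ^ L := by omega
    have ht1 : 1 ≤ (2 : Nat) ^ L - m := by omega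
    have htsize : ((2 : Nat) ^ L - m).size ≤ L := Nat.size_le.mpr htL
    -- B's format at width L uses exactly L digits
    have hB : pvFormatBin ((PySem.Int.mod decimal ((2 : Int) ^ L)).toNat) L
        = String.ofList ((pvRbits L (2 ^ L - m)).reverse) := by
      rw [hmodB]
      have hmax : max L (max 1 ((2 : Nat) ^ L - m).size) = L := by omega
      simp only [Int.toNat_natCast, pvFormatBin, hmax]
    simp only [hnat, hmag, hrevlen, hA, hB]
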